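-- pv_equiv track=rewrite | github.com/kylejones200/predictive-maintenance-with-time-series-in-python-using-pca-statistics-and-lstms | predictive_maintenance_RUL.py | get_state_blocks
-- ===== SOURCE A (Python) =====
-- def get_state_blocks(y_vals, x_vals):
--     blocks = []
--     current = y_vals[0]
--     start = x_vals[0]
--     for i in range(1, len(y_vals)):
--         if y_vals[i] != current:
--             blocks.append((current, start, x_vals[i]))
--             start = x_vals[i]
--             current = y_vals[i]
--     blocks.append((current, start, x_vals[-1]))
--     return blocks
-- ===== SOURCE B (Python) =====
-- def get_state_blocks(y_vals, x_vals):
--     # boundary decomposition: collect block-start indices, then emit one block per boundary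
--     bounds = [0] + [i for i in range(1, len(y_vals)) if y_vals[i] != y_vals[i - 1]]
--     ends = [x_vals[b] for b in bounds[1:]] + [x_vals[-1]]
--     return [(y_vals[b], x_vals[b], e) for b, e in zip(bounds, ends)]
-- ===== Notes on version B (the rewrite author's own statement) =====
-- stated objective: alternative
-- what changed: Replaces A's single stateful scan (running current/start mutated in a loop) by a two-pass boundary decomposition: first compute the list of block-start indices, then emit one (value, start_x, end_x) triple per boundary with the next boundary's x as the end.
import Mathlib
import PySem

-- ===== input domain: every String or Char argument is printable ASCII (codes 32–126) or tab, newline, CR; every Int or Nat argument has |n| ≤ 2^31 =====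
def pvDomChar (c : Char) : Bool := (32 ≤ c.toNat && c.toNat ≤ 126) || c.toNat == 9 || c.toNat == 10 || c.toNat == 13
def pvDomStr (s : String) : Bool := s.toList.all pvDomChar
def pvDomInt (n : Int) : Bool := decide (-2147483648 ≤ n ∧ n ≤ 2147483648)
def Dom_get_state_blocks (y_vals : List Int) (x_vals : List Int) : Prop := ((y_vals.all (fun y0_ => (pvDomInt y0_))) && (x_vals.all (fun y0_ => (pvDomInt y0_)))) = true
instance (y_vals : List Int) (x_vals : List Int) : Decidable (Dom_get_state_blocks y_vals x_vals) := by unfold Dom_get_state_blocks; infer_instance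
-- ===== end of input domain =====

-- B replaces A's single stateful scan by a two-pass boundary decomposition (same O(n) cost, different structure).


-- ===== PORT A =====
-- literal port of A: one fold over range(1, len(y)) carrying (blocks, current, start)
def get_state_blocks (y_vals : List Int) (x_vals : List Int) : List (Int × Int × Int) :=
  let st := (PySem.List.pyRange 1 (PySem.List.len y_vals) 1).foldl
    (fun (acc : List (Int × Int × Int) × Int × Int) i =>
      if PySem.List.pyGetD y_vals i 0 ≠ acc.2.1 then
        (acc.1 ++ [(acc.2.1, acc.2.2, PySem.List.pyGetD x_vals i 0)],
         PySem.List.pyGetD y_vals i 0, PySem.List.pyGetD x_vals i 0)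
      else acc)
    ([], PySem.List.pyGetD y_vals 0 0, PySem.List.pyGetD x_vals 0 0)
  st.1 ++ [(st.2.1, st.2.2, PySem.List.pyGetD x_vals (-1) 0)]

-- ===== PORT B =====
-- literal port of B: boundary indices, then end-x list, then zip/map
def get_state_blocks_alt (y_vals : List Int) (x_vals : List Int) : List (Int × Int × Int) :=
  let bounds : List Int :=
    0 :: (PySem.List.pyRange 1 (PySem.List.len y_vals) 1).filter
      (fun i => PySem.List.pyGetD y_vals i 0 ≠ PySem.List.pyGetD y_vals (i - 1) 0)
  let ends : List Int :=
    (PySem.List.slice bounds (some 1) none).map (fun b => PySem.List.pyGetD x_vals b 0)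
      ++ [PySem.List.pyGetD x_vals (-1) 0]
  (bounds.zip ends).map (fun be => (PySem.List.pyGetD y_vals be.1 0, PySem.List.pyGetD x_vals be.1 0, be.2))

-- ===== PRECONDITION & SPEC =====
-- Pre_: exactly the inputs where Python A returns: nonempty y and x, and every
-- change index i (y[i] != y[i-1]) must be a valid index into x_vals.
def Pre_get_state_blocks (y_vals : List Int) (x_vals : List Int) : Prop :=
  y_vals ≠ [] ∧ x_vals ≠ [] ∧
    ((List.range (y_vals.length - 1)).all
      (fun i => y_vals.getD (i + 1) 0 == y_vals.getD i 0 || decide (i + 1 < x_vals.length))) = true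
instance (y_vals : List Int) (x_vals : List Int) : Decidable (Pre_get_state_blocks y_vals x_vals) := by
  unfold Pre_get_state_blocks; infer_instance

def pvWitness_get_state_blocks : List Int × List Int := ([1, 1, 2], [10, 11, 12])

def Spec_get_state_blocks (y_vals : List Int) (x_vals : List Int) (out : List (Int × Int × Int)) : Prop := out = get_state_blocks_alt y_vals x_vals
instance (y_vals : List Int) (x_vals : List Int) (out : List (Int × Int × Int)) : Decidable (Spec_get_state_blocks y_vals x_vals out) := by unfold Spec_get_state_blocks; infer_instance

-- ===== CLAIM (what is proved, stated in full; the proofs are below) =====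
def Claim_equal_get_state_blocks : Prop := ∀ (y_vals : List Int) (x_vals : List Int), Dom_get_state_blocks y_vals x_vals → Pre_get_state_blocks y_vals x_vals → Spec_get_state_blocks y_vals x_vals (get_state_blocks y_vals x_vals)

-- ===== LEMMAS AND PROOFS =====

-- common normal form: the block list emitted from a current block (c, s) and the
-- remaining change indices
def pvEmit (y_vals x_vals : List Int) (c s : Int) : List Int → List (Int × Int × Int)
  | [] => [(c, s, PySem.List.pyGetD x_vals (-1) 0)]
  | i :: rest =>
      (c, s, PySem.List.pyGetD x_vals i 0) ::
        pvEmit y_vals x_vals (PySem.List.pyGetD y_vals i 0) (PySem.List.pyGetD x_vals i 0) rest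

lemma pvB_emit (y_vals x_vals : List Int) :
    ∀ (L : List Int) (b : Int),
      ((b :: L).zip ((L.map (fun b => PySem.List.pyGetD x_vals b 0)) ++ [PySem.List.pyGetD x_vals (-1) 0])).map
          (fun be => (PySem.List.pyGetD y_vals be.1 0, PySem.List.pyGetD x_vals be.1 0, be.2))
        = pvEmit y_vals x_vals (PySem.List.pyGetD y_vals b 0) (PySem.List.pyGetD x_vals b 0) L := by
  intro L
  induction L with
  | nil => intro b; simp [pvEmit]
  | cons i rest ih => intro b; simp [pvEmit, ih i]

lemma pvA_fold (y_vals x_vals : List Int) (n : Int) :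
    ∀ (k : Nat) (a : Int), (n - a).toNat = k → 1 ≤ a →
      ∀ (blocks : List (Int × Int × Int)) (s : Int),
        (let st := (PySem.List.pyRange a n 1).foldl
            (fun (acc : List (Int × Int × Int) × Int × Int) i =>
              if PySem.List.pyGetD y_vals i 0 ≠ acc.2.1 then
                (acc.1 ++ [(acc.2.1, acc.2.2, PySem.List.pyGetD x_vals i 0)],
                 PySem.List.pyGetD y_vals i 0, PySem.List.pyGetD x_vals i 0)
              else acc)
            (blocks, PySem.List.pyGetD y_vals (a - 1) 0, s)
         st.1 ++ [(st.2.1, st.2.2, PySem.List.pyGetD x_vals (-1) 0)])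
        = blocks ++ pvEmit y_vals x_vals (PySem.List.pyGetD y_vals (a - 1) 0) s
            ((PySem.List.pyRange a n 1).filter
              (fun i => PySem.List.pyGetD y_vals i 0 ≠ PySem.List.pyGetD y_vals (i - 1) 0)) := by
  intro k
  induction k with
  | zero =>
      intro a hk _ blocks s
      rw [PySem.List.pyRange_one_eq_nil (by omega)]
      simp [pvEmit]
  | succ k ih =>
      intro a hk ha blocks s
      have hlt : a < n := by omega
      rw [PySem.List.pyRange_one_cons hlt]
      simp only [List.foldl_cons, List.filter_cons]
      by_cases hch : PySem.List.pyGetD y_vals a 0 = PySem.List.pyGetD y_vals (a - 1) 0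
      · have H := ih (a + 1) (by omega) (by omega) blocks s
        simp only [show a + 1 - 1 = a from by ring] at H
        rw [hch] at H
        simpa [hch] using H
      · have H := ih (a + 1) (by omega) (by omega)
          (blocks ++ [(PySem.List.pyGetD y_vals (a - 1) 0, s, PySem.List.pyGetD x_vals a 0)])
          (PySem.List.pyGetD x_vals a 0)
        simp only [show a + 1 - 1 = a from by ring] at H
        simpa [hch, pvEmit] using H

-- ===== VERDICT (by name: the statement is the Claim_ definition above) =====
theorem get_state_blocks_spec : Claim_equal_get_state_blocks := by
  intro y_vals x_vals _ _
  unfold Spec_get_state_blocks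
  simp only [get_state_blocks, get_state_blocks_alt, PySem.List.slice_from_one, List.tail_cons]
  rw [pvB_emit y_vals x_vals _ 0]
  have := pvA_fold y_vals x_vals (PySem.List.len y_vals)
    (PySem.List.len y_vals - 1).toNat 1 rfl (by omega) [] (PySem.List.pyGetD x_vals 0 0)
  simp only [show (1 : Int) - 1 = 0 from by ring, List.nil_append] at this
  exact this
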